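-- pv_equiv track=rewrite | github.com/ShiotaTakumi/RotationalUnfolding | scripts/isomorphic_remover.py | build_sequence_for_faces
-- ===== SOURCE A (Python) =====
-- def build_sequence_for_faces(poly, faces):
--     seq = []
--     adj_edges = poly["adj_edges"]
--     k = len(faces)
--
--     for j in range(k):
--         gon, edge_id, face_id, *_ = faces[j]
--         seq.append(gon)
--
--         if j == 0:
--             seq.append(0)
--             continue
--         if j == k - 1:
--             seq.append(-1)
--             continue
--
--         pre_edge  = edge_id
--         next_edge = faces[j + 1][1]
--
--         edges = adj_edges[face_id]
--         try:
--             pos = edges.index(pre_edge)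
--         except ValueError:
--             pos = 0
--
--         cnt = 1
--         for step in range(1, gon + 1):
--             idx = (pos - step) % gon
--             if edges[idx] == next_edge:
--                 break
--             cnt += 1
--
--         seq.append(cnt)
--
--     return seq
-- ===== SOURCE B (Python) =====
-- def _middle_count(adj_edges, face, nxt):
--     gon, pre, fid = face[0], face[1], face[2]
--     edges = adj_edges[fid]
--     try:
--         pos = edges.index(pre)
--     except ValueError:
--         pos = 0
--     # the backward walk from pos reaches slot q after ((pos - q - 1) % gon) + 1
--     # steps; the nearest matching slot is the minimum over all matches.
--     hits = [((pos - q - 1) % gon) + 1 for q in range(gon) if edges[q] == nxt[1]]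
--     return min(hits) if hits else gon + 1
--
--
-- def build_sequence_for_faces(poly, faces):
--     adj_edges = poly["adj_edges"]
--     if not faces:
--         return []
--     out = [faces[0][0], 0]
--     if len(faces) == 1:
--         return out
--     for face, nxt in zip(faces[1:], faces[2:]):
--         out += [face[0], _middle_count(adj_edges, face, nxt)]
--     out += [faces[-1][0], -1]
--     return out
-- ===== Notes on version B (the rewrite author's own statement) =====
-- stated objective: alternative
-- what changed: Replaces the index-driven foldl with head/tail handling plus a zip over adjacent face pairs, and replaces the backward modular step loop by a forward scan taking the minimum of a closed-form step count ((pos - q - 1) % gon + 1) over matching slots.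
import Mathlib
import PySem

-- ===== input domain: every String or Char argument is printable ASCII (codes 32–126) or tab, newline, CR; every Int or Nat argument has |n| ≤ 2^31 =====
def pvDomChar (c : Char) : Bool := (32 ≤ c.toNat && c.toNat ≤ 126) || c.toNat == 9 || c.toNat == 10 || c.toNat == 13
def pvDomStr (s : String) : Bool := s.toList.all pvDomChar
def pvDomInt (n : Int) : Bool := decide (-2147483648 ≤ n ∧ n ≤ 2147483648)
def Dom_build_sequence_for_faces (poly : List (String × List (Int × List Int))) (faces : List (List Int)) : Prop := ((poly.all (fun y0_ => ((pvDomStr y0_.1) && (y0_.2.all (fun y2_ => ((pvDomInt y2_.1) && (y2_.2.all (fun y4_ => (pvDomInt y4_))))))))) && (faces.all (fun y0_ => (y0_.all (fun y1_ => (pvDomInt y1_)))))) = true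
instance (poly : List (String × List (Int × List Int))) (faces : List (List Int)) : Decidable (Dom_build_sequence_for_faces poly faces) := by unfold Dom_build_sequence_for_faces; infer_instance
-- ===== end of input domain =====

-- B restructures the build: head [gon,0] and tail [gon,-1] handled outside the loop, middle
-- entries produced by one pass over zip(faces[1:], faces[2:]), with the backward step loop
-- replaced by a forward scan taking the minimum closed-form step count (alternative, same cost).

-- ===== PORT A =====
-- A's inner loop `for step in range(1, gon+1): if edges[(pos-step)%gon]==next_edge: break; cnt+=1`
def pvAGo (edges : List Int) (gon pos next_edge : Int) : List Int → Int → Int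
  | [], cnt => cnt
  | step :: rest, cnt =>
      if PySem.List.pyGetD edges (PySem.Int.mod (pos - step) gon) 0 = next_edge then cnt
      else pvAGo edges gon pos next_edge rest (cnt + 1)

def build_sequence_for_faces (poly : List (String × List (Int × List Int))) (faces : List (List Int)) : List Int :=
  let adj_edges := (List.lookup "adj_edges" poly).getD []
  let k := faces.length
  (List.range k).foldl (fun seq j =>
    let face := faces.getD j []
    let gon := face.getD 0 0
    let edge_id := face.getD 1 0
    let face_id := face.getD 2 0
    let seq := seq ++ [gon]
    if j = 0 then seq ++ [0]
    else if j = k - 1 then seq ++ [(-1 : Int)]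
    else
      let pre_edge := edge_id
      let next_edge := (faces.getD (j + 1) []).getD 1 0
      let edges := (List.lookup face_id adj_edges).getD []
      let pos : Int := ((PySem.List.index? edges pre_edge).map (fun n => (n : Int))).getD 0
      seq ++ [pvAGo edges gon pos next_edge (PySem.List.pyRange 1 (gon + 1) 1) 1]) []

-- ===== PORT B =====
-- Source B's `_middle_count`: forward scan of the edge slots, minimum of the closed-form step count
def pv_middle_count (adj_edges : List (Int × List Int)) (face nxt : List Int) : Int :=
  let gon := face.getD 0 0
  let pre := face.getD 1 0
  let fid := face.getD 2 0
  let edges := (List.lookup fid adj_edges).getD []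
  let pos : Int := ((PySem.List.index? edges pre).map (fun n => (n : Int))).getD 0
  let hits := ((PySem.List.pyRange 0 gon 1).filter
      (fun q => PySem.List.pyGetD edges q 0 == nxt.getD 1 0)).map
    (fun q => PySem.Int.mod (pos - q - 1) gon + 1)
  if hits.isEmpty then gon + 1 else (PySem.List.min? hits (fun x => x)).getD (gon + 1)

def build_sequence_for_faces_alt (poly : List (String × List (Int × List Int))) (faces : List (List Int)) : List Int :=
  let adj_edges := (List.lookup "adj_edges" poly).getD []
  match faces with
  | [] => []
  | f0 :: rest =>
    let out := [f0.getD 0 0, (0 : Int)]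
    if rest.isEmpty then out
    else
      let out := ((PySem.List.slice faces (some 1) none).zip
          (PySem.List.slice faces (some 2) none)).foldl
        (fun acc p => acc ++ [p.1.getD 0 0, pv_middle_count adj_edges p.1 p.2]) out
      out ++ [(PySem.List.pyGetD faces (-1) []).getD 0 0, -1]

-- ===== PRECONDITION & SPEC =====
-- Pre_ excludes inputs where A raises (missing "adj_edges" key, a face tuple shorter than 3,
-- a middle face_id absent from adj_edges, or a middle gon whose modular walk steps outside the
-- edge list) and, with them, middle faces whose declared gon is negative or exceeds the length
-- of their adjacency list: degenerate descriptors on which A's empty-range / early-break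
-- behaviour is accidental and B's natural scan raises or returns the empty-scan default.
def Pre_build_sequence_for_faces (poly : List (String × List (Int × List Int))) (faces : List (List Int)) : Prop :=
  (List.lookup "adj_edges" poly).isSome = true ∧
  (∀ f ∈ faces, 3 ≤ f.length) ∧
  (∀ j ∈ List.range faces.length, 0 < j → j + 1 < faces.length →
    let adj := (List.lookup "adj_edges" poly).getD []
    let face := faces.getD j []
    (List.lookup (face.getD 2 0) adj).isSome = true ∧
    0 ≤ face.getD 0 0 ∧
    face.getD 0 0 ≤ (((List.lookup (face.getD 2 0) adj).getD []).length : Int))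
instance (poly : List (String × List (Int × List Int))) (faces : List (List Int)) : Decidable (Pre_build_sequence_for_faces poly faces) := by unfold Pre_build_sequence_for_faces; infer_instance

def pvWitness_build_sequence_for_faces : (List (String × List (Int × List Int))) × List (List Int) :=
  ([("adj_edges", [(0, [4, 9])])], [[3, 1, 0], [2, 9, 0], [3, 4, 0]])

def Spec_build_sequence_for_faces (poly : List (String × List (Int × List Int))) (faces : List (List Int)) (out : List Int) : Prop := out = build_sequence_for_faces_alt poly faces
instance (poly : List (String × List (Int × List Int))) (faces : List (List Int)) (out : List Int) : Decidable (Spec_build_sequence_for_faces poly faces out) := by unfold Spec_build_sequence_for_faces; infer_instance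

-- ===== CLAIM (what is proved, stated in full; the proofs are below) =====
def Claim_equal_build_sequence_for_faces : Prop := ∀ (poly : List (String × List (Int × List Int))) (faces : List (List Int)), Dom_build_sequence_for_faces poly faces → Pre_build_sequence_for_faces poly faces → Spec_build_sequence_for_faces poly faces (build_sequence_for_faces poly faces)

-- ===== LEMMAS AND PROOFS =====

theorem pvWitness_ok :
    Dom_build_sequence_for_faces pvWitness_build_sequence_for_faces.1 pvWitness_build_sequence_for_faces.2 ∧
    Pre_build_sequence_for_faces pvWitness_build_sequence_for_faces.1 pvWitness_build_sequence_for_faces.2 := by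
  constructor <;> decide

-- the closed-form minimum, as a single expression (pv_middle_count without the empty test)
def pvBCnt (edges : List Int) (gon pos next_edge : Int) : Int :=
  (PySem.List.min?
    (((PySem.List.pyRange 0 gon 1).filter
        (fun q => PySem.List.pyGetD edges q 0 == next_edge)).map
      (fun q => PySem.Int.mod (pos - q - 1) gon + 1))
    (fun x => x)).getD (gon + 1)

-- one step of A's outer loop, as the two-element block it appends
def pvG (adj : List (Int × List Int)) (faces : List (List Int)) (j : Nat) : List Int :=
  let face := faces.getD j []
  let gon := face.getD 0 0
  if j = 0 then [gon, 0]
  else if j = faces.length - 1 then [gon, -1]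
  else
    let next_edge := (faces.getD (j + 1) []).getD 1 0
    let edges := (List.lookup (face.getD 2 0) adj).getD []
    let pos : Int := ((PySem.List.index? edges (face.getD 1 0)).map (fun n => (n : Int))).getD 0
    [gon, pvAGo edges gon pos next_edge (PySem.List.pyRange 1 (gon + 1) 1) 1]

theorem pv_if_min (hits : List Int) (d : Int) :
    (if hits.isEmpty then d else (PySem.List.min? hits (fun x => x)).getD d) =
      (PySem.List.min? hits (fun x => x)).getD d := by
  cases hits with
  | nil => simp [(PySem.List.min?_eq_none_iff ([] : List Int) (fun x => x)).2 rfl]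
  | cons h t => simp

theorem pv_middle_count_eq (adj : List (Int × List Int)) (face nxt : List Int) :
    pv_middle_count adj face nxt =
      pvBCnt ((List.lookup (face.getD 2 0) adj).getD [])
        (face.getD 0 0)
        (((PySem.List.index? ((List.lookup (face.getD 2 0) adj).getD []) (face.getD 1 0)).map
            (fun n => (n : Int))).getD 0)
        (nxt.getD 1 0) := by
  unfold pv_middle_count pvBCnt
  exact pv_if_min _ _

theorem pvAGo_spec (edges : List Int) (gon pos next_edge : Int) :
    ∀ (l : List Int) (c : Int),
      (∀ (i : Nat) (h : i < l.length), l[i] = c + i) →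
      pvAGo edges gon pos next_edge l c =
        ((l.filter (fun s => PySem.List.pyGetD edges (PySem.Int.mod (pos - s) gon) 0 == next_edge)).headD
          (c + l.length)) := by
  intro l
  induction l with
  | nil => intro c _; simp [pvAGo]
  | cons x rest ih =>
    intro c hcons
    have hx : x = c := by have := hcons 0 (by simp); simpa using this
    simp only [hx]
    by_cases hm : PySem.List.pyGetD edges (PySem.Int.mod (pos - c) gon) 0 = next_edge
    · have hb : (PySem.List.pyGetD edges (PySem.Int.mod (pos - c) gon) 0 == next_edge) = true := by
        simpa using hm
      simp [pvAGo, if_pos hm, hb]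
    · have hrest : ∀ (i : Nat) (h : i < rest.length), rest[i] = (c + 1) + i := by
        intro i hi
        have := hcons (i + 1) (by simpa using Nat.succ_lt_succ hi)
        simp [hx] at this
        rw [this]; ring
      have hb : (PySem.List.pyGetD edges (PySem.Int.mod (pos - c) gon) 0 == next_edge) = false := by
        simpa using hm
      simp only [pvAGo, if_neg hm, ih (c + 1) hrest, List.filter_cons, hb]
      simp only [Bool.false_eq_true, if_false, List.length_cons]
      congr 1
      push_cast
      ring

theorem pvFact1 (gon pos q : Int) (hg : 0 < gon) (hq : 0 ≤ q) (hq2 : q < gon) :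
    PySem.Int.mod (pos - (PySem.Int.mod (pos - q - 1) gon + 1)) gon = q := by
  rw [PySem.Int.mod_eq_emod_of_pos hg, PySem.Int.mod_eq_emod_of_pos hg]
  have h1 : pos - ((pos - q - 1) % gon + 1) = (pos - 1) - (pos - q - 1) % gon := by ring
  rw [h1, Int.sub_emod, Int.emod_emod_of_dvd _ dvd_rfl, ← Int.sub_emod]
  have h2 : pos - 1 - (pos - q - 1) = q := by ring
  rw [h2, Int.emod_eq_of_lt hq hq2]

theorem pvFact2 (gon pos s : Int) (hg : 0 < gon) (hs : 1 ≤ s) (hs2 : s ≤ gon) :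
    PySem.Int.mod (pos - PySem.Int.mod (pos - s) gon - 1) gon + 1 = s := by
  rw [PySem.Int.mod_eq_emod_of_pos hg, PySem.Int.mod_eq_emod_of_pos hg]
  have h1 : pos - (pos - s) % gon - 1 = (pos - 1) - (pos - s) % gon := by ring
  rw [h1, Int.sub_emod, Int.emod_emod_of_dvd _ dvd_rfl, ← Int.sub_emod]
  have h2 : pos - 1 - (pos - s) = s - 1 := by ring
  rw [h2, Int.emod_eq_of_lt (by omega) (by omega)]
  ring

theorem pvPerm (edges : List Int) (gon pos next_edge : Int) (hg : 0 < gon) :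
    (((PySem.List.pyRange 0 gon 1).filter
        (fun q => PySem.List.pyGetD edges q 0 == next_edge)).map
      (fun q => PySem.Int.mod (pos - q - 1) gon + 1)).Perm
    ((PySem.List.pyRange 1 (gon + 1) 1).filter
      (fun s => PySem.List.pyGetD edges (PySem.Int.mod (pos - s) gon) 0 == next_edge)) := by
  have hmemQ : ∀ q ∈ (PySem.List.pyRange 0 gon 1).filter
      (fun q => PySem.List.pyGetD edges q 0 == next_edge), 0 ≤ q ∧ q < gon := by
    intro q hq
    have := List.mem_filter.1 hq
    exact PySem.List.mem_pyRange_one.1 this.1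
  have hnd1 : (((PySem.List.pyRange 0 gon 1).filter
      (fun q => PySem.List.pyGetD edges q 0 == next_edge)).map
      (fun q => PySem.Int.mod (pos - q - 1) gon + 1)).Nodup := by
    apply List.Nodup.map_on
    · intro x hx y hy hf
      obtain ⟨hx0, hx1⟩ := hmemQ x hx
      obtain ⟨hy0, hy1⟩ := hmemQ y hy
      have := pvFact1 gon pos x hg hx0 hx1
      rw [hf, pvFact1 gon pos y hg hy0 hy1] at this
      exact this.symm
    · exact List.Nodup.filter _ (PySem.List.nodup_pyRange_one 0 gon)
  have hnd2 : ((PySem.List.pyRange 1 (gon + 1) 1).filter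
      (fun s => PySem.List.pyGetD edges (PySem.Int.mod (pos - s) gon) 0 == next_edge)).Nodup :=
    List.Nodup.filter _ (PySem.List.nodup_pyRange_one 1 (gon + 1))
  refine (List.perm_ext_iff_of_nodup hnd1 hnd2).2 ?_
  intro x
  constructor
  · intro hx
    obtain ⟨q, hq, hfq⟩ := List.mem_map.1 hx
    obtain ⟨hqr, hqp⟩ := List.mem_filter.1 hq
    obtain ⟨hq0, hq1⟩ := PySem.List.mem_pyRange_one.1 hqr
    apply List.mem_filter.2
    constructor
    · apply PySem.List.mem_pyRange_one.2
      have h1 := PySem.Int.mod_nonneg (pos - q - 1) hg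
      have h2 := PySem.Int.mod_lt (pos - q - 1) hg
      rw [← hfq]
      omega
    · rw [← hfq, pvFact1 gon pos q hg hq0 hq1]
      exact hqp
  · intro hx
    obtain ⟨hxr, hxp⟩ := List.mem_filter.1 hx
    obtain ⟨hx1, hx2⟩ := PySem.List.mem_pyRange_one.1 hxr
    apply List.mem_map.2
    refine ⟨PySem.Int.mod (pos - x) gon, ?_, ?_⟩
    · apply List.mem_filter.2
      refine ⟨PySem.List.mem_pyRange_one.2 ⟨PySem.Int.mod_nonneg _ hg, PySem.Int.mod_lt _ hg⟩, ?_⟩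
      exact hxp
    · exact pvFact2 gon pos x hg hx1 (by omega)

theorem pvCnt_eq (edges : List Int) (gon pos next_edge : Int)
    (h0 : 0 ≤ gon) :
    pvAGo edges gon pos next_edge (PySem.List.pyRange 1 (gon + 1) 1) 1 =
      pvBCnt edges gon pos next_edge := by
  by_cases hg : 0 < gon
  · rw [pvAGo_spec edges gon pos next_edge _ 1
      (by intro i hi; rw [PySem.List.getElem_pyRange_one])]
    have hlen : (1 : Int) + ((PySem.List.pyRange 1 (gon + 1) 1).length : Int) = gon + 1 := by
      rw [PySem.List.length_pyRange_one]; omega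
    rw [hlen]
    have hperm := pvPerm edges gon pos next_edge hg
    unfold pvBCnt
    cases hL : (PySem.List.pyRange 1 (gon + 1) 1).filter
        (fun s => PySem.List.pyGetD edges (PySem.Int.mod (pos - s) gon) 0 == next_edge) with
    | nil =>
      rw [hL] at hperm
      rw [List.Perm.eq_nil hperm]
      simp [(PySem.List.min?_eq_none_iff _ _).2 rfl]
    | cons s t =>
      rw [hL] at hperm
      have hne : (((PySem.List.pyRange 0 gon 1).filter
          (fun q => PySem.List.pyGetD edges q 0 == next_edge)).map
          (fun q => PySem.Int.mod (pos - q - 1) gon + 1)) ≠ [] := by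
        intro h; rw [h] at hperm; exact (List.cons_ne_nil s t) hperm.symm.eq_nil
      obtain ⟨m, hm⟩ : ∃ m, PySem.List.min?
          (((PySem.List.pyRange 0 gon 1).filter
              (fun q => PySem.List.pyGetD edges q 0 == next_edge)).map
            (fun q => PySem.Int.mod (pos - q - 1) gon + 1)) (fun x => x) = some m := by
        cases hmin : PySem.List.min? _ (fun x : Int => x) with
        | none => exact absurd ((PySem.List.min?_eq_none_iff _ _).1 hmin) hne
        | some m => exact ⟨m, rfl⟩
      rw [hm]
      have hmemL : m ∈ s :: t := hperm.subset (PySem.List.min?_mem hm)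
      have hs : s ∈ s :: t := List.mem_cons_self
      have hms : m ≤ s := PySem.List.min?_isMin hm s (hperm.symm.subset hs)
      have hpw : (s :: t).Pairwise (· < ·) := by
        rw [← hL]
        exact List.Pairwise.filter _ (PySem.List.pairwise_lt_pyRange_one 1 (gon + 1))
      have hsm : s ≤ m := by
        rcases List.mem_cons.1 hmemL with h | h
        · omega
        · have := (List.pairwise_cons.1 hpw).1 m h; omega
      have : m = s := le_antisymm hms hsm
      simp [this]
  · have hgz : gon = 0 := by omega
    subst hgz
    rw [PySem.List.pyRange_one_eq_nil (by omega)]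
    unfold pvBCnt
    rw [PySem.List.pyRange_one_eq_nil (by omega)]
    simp [pvAGo, (PySem.List.min?_eq_none_iff ([] : List Int) (fun x => x)).2 rfl]

-- A's foldl is the flatMap of the per-index blocks
theorem pvA_flatMap (poly : List (String × List (Int × List Int))) (faces : List (List Int)) :
    build_sequence_for_faces poly faces =
      (List.range faces.length).flatMap
        (pvG ((List.lookup "adj_edges" poly).getD []) faces) := by
  unfold build_sequence_for_faces
  have h2 : (List.range faces.length).foldl
      (fun acc j => acc ++ pvG ((List.lookup "adj_edges" poly).getD []) faces j) [] =
      (List.range faces.length).flatMap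
        (pvG ((List.lookup "adj_edges" poly).getD []) faces) := by
    rw [PySem.List.foldl_append_eq_flatMap]
    simp
  refine Eq.trans ?_ h2
  apply PySem.List.foldl_congr_mem
  intro acc j hj
  unfold pvG
  dsimp only
  by_cases h0 : j = 0
  · simp [h0]
  · by_cases h1 : j = faces.length - 1
    · simp [h1]
      split_ifs <;> simp
    · simp [h0, h1, List.append_assoc]

theorem pvFlatMap_congr {l : List Nat} {f g : Nat → List Int} (h : ∀ x ∈ l, f x = g x) :
    l.flatMap f = l.flatMap g := by
  induction l with
  | nil => rfl
  | cons x t ih =>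
    simp only [List.flatMap_cons, h x List.mem_cons_self,
      ih (fun y hy => h y (List.mem_cons_of_mem x hy))]

-- the zip of the two tail slices, as an index range
theorem pvZip_range (faces : List (List Int)) (h2 : 2 ≤ faces.length) :
    (PySem.List.slice faces (some 1) none).zip (PySem.List.slice faces (some 2) none) =
      (List.range (faces.length - 2)).map
        (fun i => (faces.getD (i + 1) [], faces.getD (i + 2) [])) := by
  have e1 : PySem.List.slice faces (some 1) none = faces.drop 1 := by
    have := PySem.List.slice_from_natCast faces 1
    simpa using this
  have e2 : PySem.List.slice faces (some 2) none = faces.drop 2 := by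
    have := PySem.List.slice_from_natCast faces 2
    simpa using this
  rw [e1, e2]
  apply List.ext_getElem
  · simp; omega
  · intro i hi hi'
    have hb1 : i + 1 < faces.length := by simp at hi; omega
    have hb2 : i + 2 < faces.length := by simp at hi; omega
    simp only [List.getElem_zip, List.getElem_drop, List.getElem_map, List.getElem_range,
      List.getD_eq_getElem?_getD, List.getElem?_eq_getElem hb1, List.getElem?_eq_getElem hb2,
      Option.getD_some]
    simp [show 1 + i = i + 1 from by omega, show 2 + i = i + 2 from by omega]

theorem pvMatch_reduce (poly : List (String × List (Int × List Int)))
    (f0 f1 : List Int) (r : List (List Int)) :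
    build_sequence_for_faces_alt poly (f0 :: f1 :: r) =
      ((PySem.List.slice (f0 :: f1 :: r) (some 1) none).zip
          (PySem.List.slice (f0 :: f1 :: r) (some 2) none)).foldl
        (fun acc p => acc ++ [p.1.getD 0 0,
          pv_middle_count ((List.lookup "adj_edges" poly).getD []) p.1 p.2])
        [f0.getD 0 0, 0] ++
      [(PySem.List.pyGetD (f0 :: f1 :: r) (-1) []).getD 0 0, -1] := by
  rfl

-- ===== VERDICT (by name: the statement is the Claim_ definition above) =====
theorem build_sequence_for_faces_spec : Claim_equal_build_sequence_for_faces := by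
  intro poly faces _ hpre
  unfold Spec_build_sequence_for_faces
  rw [pvA_flatMap]
  match faces, hpre with
  | [], _ => rfl
  | [f0], _ => simp [build_sequence_for_faces_alt, pvG]
  | f0 :: f1 :: r, hpre =>
    have hk2 : 2 ≤ (f0 :: f1 :: r).length := by simp
    rw [pvMatch_reduce, PySem.List.foldl_append_eq_flatMap, pvZip_range _ hk2,
      List.flatMap_map]
    have hk : (f0 :: f1 :: r).length = ((f0 :: f1 :: r).length - 2) + 1 + 1 := by simp
    rw [hk, List.range_succ, List.range_succ_eq_map, List.flatMap_append,
      List.flatMap_cons, List.flatMap_map, List.flatMap_singleton]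
    have hG0 : pvG ((List.lookup "adj_edges" poly).getD []) (f0 :: f1 :: r) 0 =
        [f0.getD 0 0, 0] := by
      simp [pvG]
    have hGlast : pvG ((List.lookup "adj_edges" poly).getD []) (f0 :: f1 :: r)
          ((f0 :: f1 :: r).length - 2 + 1) =
        [(PySem.List.pyGetD (f0 :: f1 :: r) (-1) []).getD 0 0, -1] := by
      unfold pvG
      have hne : (f0 :: f1 :: r) ≠ [] := by simp
      rw [PySem.List.pyGetD_neg_one _ _ hne]
      have h1 : (f0 :: f1 :: r).length - 2 + 1 = (f0 :: f1 :: r).length - 1 := by simp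
      have hlt : (f0 :: f1 :: r).length - 1 < (f0 :: f1 :: r).length := by simp
      rw [List.getLast_eq_getElem]
      simp only [h1, List.getD_eq_getElem?_getD,
        List.getElem?_eq_getElem hlt, Option.getD_some]
      simp
    have hmid : ∀ i ∈ List.range ((f0 :: f1 :: r).length - 2),
        pvG ((List.lookup "adj_edges" poly).getD []) (f0 :: f1 :: r) (i + 1) =
          [((f0 :: f1 :: r).getD (i + 1) []).getD 0 0,
            pv_middle_count ((List.lookup "adj_edges" poly).getD [])
              ((f0 :: f1 :: r).getD (i + 1) []) ((f0 :: f1 :: r).getD (i + 2) [])] := by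
      intro i hi
      have hik : i < r.length := by simpa using List.mem_range.1 hi
      obtain ⟨-, hg0, -⟩ := hpre.2.2 (i + 1) (List.mem_range.2 (by simp; omega))
        (by omega) (by simp; omega)
      unfold pvG
      have h0 : i + 1 ≠ 0 := by omega
      have h1 : i + 1 ≠ (f0 :: f1 :: r).length - 1 := by simp; omega
      rw [pv_middle_count_eq]
      simp only [if_neg h0, if_neg h1]
      rw [pvCnt_eq _ _ _ _ hg0]
    rw [hG0, hGlast, pvFlatMap_congr hmid]
    simp
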